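-- pv_equiv track=rewrite | github.com/allali/EirLabSoundAndLights | sandbox/sound/play_file_func.py | parse
-- ===== SOURCE A (Python) =====
-- def parse(str): #str should be like : id_speaker:id_track,id_track.id_speaker:id...$
--     lib = {}
--     isSpeaker = True
--     currentSpeaker = None
--     for char in str:
--         if (char == ":" or char == ","):
--             isSpeaker = False
--         elif(char == "."):
--             isSpeaker = True
--         else:
--             if (isSpeaker):
--                 currentSpeaker = char
--                 lib[char] = []
--             else:
--                 lib[currentSpeaker].append(char)
--     return lib
-- ===== SOURCE B (Python) =====
-- import re
--
-- def parse(str):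
--     lib = {}
--     speaker = True
--     current = None
--     for tok in re.split(r'([:.,]+)', str):
--         if not tok:
--             continue
--         if tok[0] in ':.,':
--             speaker = tok[-1] == '.'
--         elif speaker:
--             for ch in tok:
--                 lib[ch] = []
--             current = tok[-1]
--         else:
--             for ch in tok:
--                 lib[current].append(ch)
--     return lib
-- ===== Notes on version B (the rewrite author's own statement) =====
-- stated objective: alternative
-- what changed: B tokenizes the string with re.split(r'([:.,]+)') into delimiter groups and character runs and processes whole tokens (a group sets the mode from its last char, a speaker run bulk-inserts and takes its last char as current speaker), instead of A's char-by-char mode-flag state machine.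
import Mathlib
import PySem

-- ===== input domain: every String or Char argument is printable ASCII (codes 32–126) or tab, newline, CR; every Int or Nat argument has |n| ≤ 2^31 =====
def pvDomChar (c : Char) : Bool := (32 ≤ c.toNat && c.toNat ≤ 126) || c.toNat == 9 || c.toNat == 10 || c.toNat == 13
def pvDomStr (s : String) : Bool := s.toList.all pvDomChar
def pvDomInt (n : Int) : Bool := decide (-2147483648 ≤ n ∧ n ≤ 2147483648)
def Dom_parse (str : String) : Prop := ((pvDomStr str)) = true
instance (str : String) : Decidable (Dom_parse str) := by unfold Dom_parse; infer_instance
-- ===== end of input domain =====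

-- B replaces A's char-by-char mode flag toggling with a tokenizer (delimiter groups / character runs)
-- processed run-at-a-time; objective: alternative decomposition, equal cost. Equivalence is about the
-- return value; neither version mutates its argument.

-- ===== PORT A =====
-- state: (lib, isSpeaker, currentSpeaker); the 'none' branch is unreachable under Pre_parse
-- (Python raises KeyError there): the port leaves lib unchanged in that case.
def parseStepA (st : PySem.Dict String (List String) × Bool × Option String) (c : Char) :
    PySem.Dict String (List String) × Bool × Option String :=
  let (lib, spk, cur) := st
  if c = ':' ∨ c = ',' then (lib, false, cur)
  else if c = '.' then (lib, true, cur)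
  else if spk then (lib.insert (String.mk [c]) [], true, some (String.mk [c]))
  else match cur with
    | some k => (lib.modify k [] (fun v => v ++ [String.mk [c]]), false, cur)
    | none => (lib, false, cur)

def parse (str : String) : List (String × List String) :=
  (str.toList.foldl parseStepA (PySem.Dict.empty, true, none)).1.items

-- ===== PORT B =====
def parseIsDelim (c : Char) : Bool := c = ':' || c = ',' || c = '.'

-- re.split(r'([:.,]+)', s) with the empty pieces dropped = maximal homogeneous runs
def parseTokenize (l : List Char) : List (List Char) :=
  match l with
  | [] => []
  | c :: cs =>
    (c :: cs.takeWhile (fun d => parseIsDelim d == parseIsDelim c)) ::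
      parseTokenize (cs.dropWhile (fun d => parseIsDelim d == parseIsDelim c))
termination_by l.length
decreasing_by
  simp only [List.length_cons]
  exact Nat.lt_succ_of_le (List.length_dropWhile_le _ _)

-- one token: a delimiter group sets the mode from its last char; a run is processed whole
-- (the 'none' branch is unreachable under Pre_parse, where Python B raises KeyError too)
def parseStepB (st : PySem.Dict String (List String) × Bool × Option String) (t : List Char) :
    PySem.Dict String (List String) × Bool × Option String :=
  let (lib, spk, cur) := st
  match t with
  | [] => st
  | c :: rest =>
    if parseIsDelim c then (lib, decide ((c :: rest).getLast (by simp) = '.'), cur)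
    else if spk then
      ((c :: rest).foldl (fun d ch => d.insert (String.mk [ch]) []) lib, true,
        some (String.mk [(c :: rest).getLast (by simp)]))
    else match cur with
      | some k =>
        ((c :: rest).foldl (fun d ch => d.modify k [] (fun v => v ++ [String.mk [ch]])) lib,
          false, cur)
      | none => (lib, false, cur)

def parse_alt (str : String) : List (String × List String) :=
  ((parseTokenize str.toList).foldl parseStepB (PySem.Dict.empty, true, none)).1.items

-- ===== PRECONDITION & SPEC =====
-- Pre_ excludes exactly the strings on which Python A raises KeyError(None): a non-delimiter
-- character exists and the leading delimiter group ends with ':' or ',' (track mode with no speaker).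
def Pre_parse (str : String) : Prop :=
  str.toList.takeWhile parseIsDelim = str.toList ∨
  str.toList.takeWhile parseIsDelim = [] ∨
  (str.toList.takeWhile parseIsDelim).getLast? = some '.'
instance (str : String) : Decidable (Pre_parse str) := by unfold Pre_parse; infer_instance

def pvWitness_parse : String := "a:b,c.d:e"

def Spec_parse (str : String) (out : List (String × List String)) : Prop := out = parse_alt str
instance (str : String) (out : List (String × List String)) : Decidable (Spec_parse str out) := by
  unfold Spec_parse; infer_instance

-- ===== CLAIM (what is proved, stated in full; the proofs are below) =====
def Claim_equal_parse : Prop := ∀ (str : String), Dom_parse str → Pre_parse str → Spec_parse str (parse str)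

-- ===== LEMMAS AND PROOFS =====

-- A delimiter char only sets the flag
theorem parseStepA_delim (lib : PySem.Dict String (List String)) (spk : Bool)
    (cur : Option String) (c : Char) (h : parseIsDelim c = true) :
    parseStepA (lib, spk, cur) c = (lib, decide (c = '.'), cur) := by
  simp only [parseIsDelim, Bool.or_eq_true, decide_eq_true_eq] at h
  unfold parseStepA
  rcases h with h | h
  · rcases h with h | h <;> simp [h]
  · subst h; simp

-- folding A over a nonempty all-delimiter group: flag becomes (last = '.')
theorem foldA_group (g : List Char) (hne : g ≠ []) (hall : ∀ c ∈ g, parseIsDelim c = true)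
    (lib : PySem.Dict String (List String)) (spk : Bool) (cur : Option String) :
    g.foldl parseStepA (lib, spk, cur) = (lib, decide (g.getLast hne = '.'), cur) := by
  induction g generalizing spk with
  | nil => exact absurd rfl hne
  | cons c cs ih =>
    rcases eq_or_ne cs [] with h | h
    · subst h
      simp [List.foldl, parseStepA_delim lib spk cur c (hall c (by simp))]
    · rw [List.foldl_cons, parseStepA_delim lib spk cur c (hall c (by simp)),
        ih h (fun d hd => hall d (by simp [hd])) _]
      simp [List.getLast_cons h]

-- folding A over a nonempty non-delimiter run in speaker mode
theorem foldA_run_spk (r : List Char) (hne : r ≠ []) (hall : ∀ c ∈ r, parseIsDelim c = false)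
    (lib : PySem.Dict String (List String)) (cur : Option String) :
    r.foldl parseStepA (lib, true, cur) =
      (r.foldl (fun d ch => d.insert (String.mk [ch]) []) lib, true,
        some (String.mk [r.getLast hne])) := by
  induction r generalizing lib cur with
  | nil => exact absurd rfl hne
  | cons c cs ih =>
    have hc := hall c (by simp)
    simp only [parseIsDelim, Bool.or_eq_false_iff, decide_eq_false_iff_not] at hc
    rcases eq_or_ne cs [] with h | h
    · subst h
      simp [List.foldl, parseStepA, hc.1.1, hc.1.2, hc.2]
    · rw [List.foldl_cons]
      have : parseStepA (lib, true, cur) c =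
          (lib.insert (String.mk [c]) [], true, some (String.mk [c])) := by
        simp [parseStepA, hc.1.1, hc.1.2, hc.2]
      rw [this, ih h (fun d hd => hall d (by simp [hd])) _ _]
      simp [List.getLast_cons h, List.foldl_cons]

-- folding A over a nonempty non-delimiter run in track mode
theorem foldA_run_trk (r : List Char) (hall : ∀ c ∈ r, parseIsDelim c = false)
    (lib : PySem.Dict String (List String)) (cur : Option String) :
    r.foldl parseStepA (lib, false, cur) =
      (match cur with
       | some k => (r.foldl (fun d ch => d.modify k [] (fun v => v ++ [String.mk [ch]])) lib, false, cur)
       | none => (lib, false, cur)) := by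
  induction r generalizing lib with
  | nil => cases cur <;> simp
  | cons c cs ih =>
    have hc := hall c (by simp)
    simp only [parseIsDelim, Bool.or_eq_false_iff, decide_eq_false_iff_not] at hc
    cases cur with
    | none =>
      rw [List.foldl_cons]
      have : parseStepA (lib, false, none) c = (lib, false, none) := by
        simp [parseStepA, hc.1.1, hc.1.2, hc.2]
      rw [this]
      exact ih (fun d hd => hall d (by simp [hd])) lib
    | some k =>
      rw [List.foldl_cons]
      have : parseStepA (lib, false, some k) c =
          (lib.modify k [] (fun v => v ++ [String.mk [c]]), false, some k) := by
        simp [parseStepA, hc.1.1, hc.1.2, hc.2]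
      rw [this, ih (fun d hd => hall d (by simp [hd])) _]
      simp [List.foldl_cons]

-- one homogeneous nonempty token: B's step = A folded over its chars
theorem parseStepB_eq_foldA (t : List Char) (hne : t ≠ [])
    (hhom : (∀ c ∈ t, parseIsDelim c = true) ∨ (∀ c ∈ t, parseIsDelim c = false))
    (st : PySem.Dict String (List String) × Bool × Option String) :
    parseStepB st t = t.foldl parseStepA st := by
  obtain ⟨lib, spk, cur⟩ := st
  cases t with
  | nil => exact absurd rfl hne
  | cons c cs =>
    rcases hhom with hall | hall
    · have hc := hall c (by simp)
      rw [foldA_group (c :: cs) (by simp) hall lib spk cur]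
      simp [parseStepB, hc]
    · have hc := hall c (by simp)
      cases spk with
      | true =>
        rw [foldA_run_spk (c :: cs) (by simp) hall lib cur]
        simp [parseStepB, hc]
      | false =>
        rw [foldA_run_trk (c :: cs) hall lib cur]
        cases cur <;> simp [parseStepB, hc]

-- tokens of the tokenizer are homogeneous
theorem parseTokenize_hom (c : Char) (cs : List Char) :
    (∀ d ∈ c :: cs.takeWhile (fun d => parseIsDelim d == parseIsDelim c),
        parseIsDelim d = parseIsDelim c) := by
  intro d hd
  rcases List.mem_cons.mp hd with h | h
  · rw [h]
  · have := List.mem_takeWhile_imp h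
    simpa using this

-- main: folding B over the tokens = folding A over the chars, for every start state
theorem foldB_tokens (l : List Char)
    (st : PySem.Dict String (List String) × Bool × Option String) :
    (parseTokenize l).foldl parseStepB st = l.foldl parseStepA st := by
  induction l using parseTokenize.induct generalizing st with
  | case1 => simp [parseTokenize]
  | case2 c cs ih =>
    rw [parseTokenize, List.foldl_cons]
    have hhom : (∀ d ∈ c :: cs.takeWhile (fun d => parseIsDelim d == parseIsDelim c),
        parseIsDelim d = parseIsDelim c) := parseTokenize_hom c cs
    have hstep := parseStepB_eq_foldA
      (c :: cs.takeWhile (fun d => parseIsDelim d == parseIsDelim c)) (by simp)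
      (by rcases Bool.eq_false_or_eq_true (parseIsDelim c) with h | h
          · exact Or.inl (fun d hd => (hhom d hd).trans h)
          · exact Or.inr (fun d hd => (hhom d hd).trans h)) st
    rw [hstep, ih, ← List.foldl_append]
    congr 1
    simp [List.takeWhile_append_dropWhile]

-- ===== VERDICT (by name: the statement is the Claim_ definition above) =====
theorem parse_spec : Claim_equal_parse := by
  intro str _ _
  unfold Spec_parse parse parse_alt
  rw [foldB_tokens]
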